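-- pv_equiv track=rewrite | github.com/frankie-eight-days/projectFreeVision | googleSearches.py | matchSearches
-- ===== SOURCE A (Python) =====
-- def matchSearches(conservativeKeyList, liberalKeyList):
--     # Lists where key words and matching indices will be held
--     keyWordsC = []
--     keyWordsL = []
--     matchingIndices = []
--
--     # Buzzword strings are broken back into words
--     for i in range(len(conservativeKeyList)):
--         keyWordsC.append(conservativeKeyList[i].split())
--     for i in range(len(liberalKeyList)):
--         keyWordsL.append(liberalKeyList[i].split())
--
--     # Searches through the conservative list looking for words that match in the liberal list
--     for cHeadIndex in range(len(keyWordsC)):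
--         for cWordIndex in range(len(keyWordsC[cHeadIndex])):
--             for lHeadIndex in range(len(keyWordsL)):
--                 for lWordIndex in range(len(keyWordsL[lHeadIndex])):
--                     # If one word matches, the string index is matched and stored
--                     if keyWordsC[cHeadIndex][cWordIndex] == keyWordsL[lHeadIndex][lWordIndex]:
--                         matchingIndices.append([cHeadIndex, lHeadIndex])
--     return matchingIndices
-- ===== SOURCE B (Python) =====
-- def matchSearches(conservativeKeyList, liberalKeyList):
--     # Index every liberal word once: word -> list of liberal indices, one per occurrence,
--     # in (lHead, lWord) order; then a single pass over the conservative words emits pairs.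
--     occ = {}
--     for lHead, phrase in enumerate(liberalKeyList):
--         for word in phrase.split():
--             occ.setdefault(word, []).append(lHead)
--     matchingIndices = []
--     for cHead, phrase in enumerate(conservativeKeyList):
--         for word in phrase.split():
--             for lHead in occ.get(word, []):
--                 matchingIndices.append([cHead, lHead])
--     return matchingIndices
-- ===== Notes on version B (the rewrite author's own statement) =====
-- stated objective: alternative
-- what changed: Replaces the four-deep nested scan (every conservative word compared against every liberal word) by a one-pass inverted index word -> ordered list of liberal indices, then a single pass over the conservative words emitting pairs by lookup.
import Mathlib
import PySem

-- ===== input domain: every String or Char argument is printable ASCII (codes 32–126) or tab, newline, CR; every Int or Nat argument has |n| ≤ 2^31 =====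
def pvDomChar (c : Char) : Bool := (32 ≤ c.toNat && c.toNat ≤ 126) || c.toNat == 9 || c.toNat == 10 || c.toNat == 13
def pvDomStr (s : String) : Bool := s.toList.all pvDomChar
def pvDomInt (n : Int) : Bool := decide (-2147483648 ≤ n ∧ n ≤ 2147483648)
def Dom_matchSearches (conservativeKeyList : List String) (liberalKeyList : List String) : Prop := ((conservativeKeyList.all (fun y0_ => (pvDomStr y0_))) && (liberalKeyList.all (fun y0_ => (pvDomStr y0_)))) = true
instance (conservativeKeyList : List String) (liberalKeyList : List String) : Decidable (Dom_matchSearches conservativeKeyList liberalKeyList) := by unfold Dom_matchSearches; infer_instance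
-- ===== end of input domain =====

-- B replaces A's quadratic all-pairs word comparison by a one-pass inverted index (word -> liberal
-- indices) plus a lookup pass; same return value, proved equal below.

-- ===== PORT A =====
def matchSearches (conservativeKeyList : List String) (liberalKeyList : List String) : List (List Int) :=
  let keyWordsC : List (List String) :=
    (PySem.List.pyRange 0 (conservativeKeyList.length : Int) 1).foldl
      (fun acc i => acc ++ [PySem.Str.split₀ (PySem.List.pyGetD conservativeKeyList i "")]) []
  let keyWordsL : List (List String) :=
    (PySem.List.pyRange 0 (liberalKeyList.length : Int) 1).foldl
      (fun acc i => acc ++ [PySem.Str.split₀ (PySem.List.pyGetD liberalKeyList i "")]) []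
  (PySem.List.pyRange 0 (keyWordsC.length : Int) 1).foldl (fun acc cHead =>
    (PySem.List.pyRange 0 ((PySem.List.pyGetD keyWordsC cHead []).length : Int) 1).foldl (fun acc cWord =>
      (PySem.List.pyRange 0 (keyWordsL.length : Int) 1).foldl (fun acc lHead =>
        (PySem.List.pyRange 0 ((PySem.List.pyGetD keyWordsL lHead []).length : Int) 1).foldl (fun acc lWord =>
          if PySem.List.pyGetD (PySem.List.pyGetD keyWordsC cHead []) cWord "" ==
             PySem.List.pyGetD (PySem.List.pyGetD keyWordsL lHead []) lWord ""
          then acc ++ [[cHead, lHead]] else acc) acc) acc) acc) []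

-- ===== PORT B =====
-- B: one-pass inverted index (word -> ordered list of liberal indices), then one pass over
-- the conservative words emitting pairs by lookup.
def matchSearches_alt (conservativeKeyList : List String) (liberalKeyList : List String) : List (List Int) :=
  let occ : PySem.Dict String (List Int) :=
    (PySem.List.enumerate liberalKeyList 0).foldl
      (fun d p => (PySem.Str.split₀ p.2).foldl (fun d w => d.modify w [] (· ++ [p.1])) d)
      PySem.Dict.empty
  (PySem.List.enumerate conservativeKeyList 0).foldl
    (fun acc p => (PySem.Str.split₀ p.2).foldl
      (fun acc w => acc ++ (occ.getD w []).map (fun l => [p.1, l])) acc) []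

-- ===== PRECONDITION & SPEC =====
def Spec_matchSearches (conservativeKeyList : List String) (liberalKeyList : List String) (out : List (List Int)) : Prop := out = matchSearches_alt conservativeKeyList liberalKeyList
instance (conservativeKeyList : List String) (liberalKeyList : List String) (out : List (List Int)) : Decidable (Spec_matchSearches conservativeKeyList liberalKeyList out) := by unfold Spec_matchSearches; infer_instance

-- ===== CLAIM (what is proved, stated in full; the proofs are below) =====
def Claim_equal_matchSearches : Prop := ∀ (conservativeKeyList : List String) (liberalKeyList : List String), Dom_matchSearches conservativeKeyList liberalKeyList → Spec_matchSearches conservativeKeyList liberalKeyList (matchSearches conservativeKeyList liberalKeyList)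

-- ===== LEMMAS AND PROOFS =====

-- the liberal indices whose phrase contains w, one entry per occurrence, in (lHead, lWord) order
def occList (liberalKeyList : List String) (w : String) : List Int :=
  (PySem.List.enumerate liberalKeyList 0).flatMap
    (fun q => ((PySem.Str.split₀ q.2).filter (fun w' => w == w')).map (fun _ => q.1))

lemma dict_inner (ws : List String) (d : PySem.Dict String (List Int)) (l : Int) (w : String) :
    (ws.foldl (fun d w' => d.modify w' [] (· ++ [l])) d).getD w []
      = d.getD w [] ++ (ws.filter (fun w' => w == w')).map (fun _ => l) := by
  induction ws generalizing d with
  | nil => simp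
  | cons a ws ih =>
    simp only [List.foldl_cons, ih, List.filter_cons]
    by_cases h : a = w
    · subst h; simp [PySem.Dict.getD_modify_self]
    · simp [PySem.Dict.getD_modify_of_ne d [] _ (Ne.symm h), Ne.symm h]

lemma dict_outer (es : List (Int × String)) (d : PySem.Dict String (List Int)) (w : String) :
    ((es.foldl (fun d p => (PySem.Str.split₀ p.2).foldl (fun d w' => d.modify w' [] (· ++ [p.1])) d) d).getD w [])
      = d.getD w [] ++ es.flatMap (fun q => ((PySem.Str.split₀ q.2).filter (fun w' => w == w')).map (fun _ => q.1)) := by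
  induction es generalizing d with
  | nil => simp
  | cons q es ih => simp [ih, dict_inner, List.append_assoc]

lemma occ_eq (liberalKeyList : List String) (w : String) :
    (((PySem.List.enumerate liberalKeyList 0).foldl
        (fun d p => (PySem.Str.split₀ p.2).foldl (fun d w' => d.modify w' [] (· ++ [p.1])) d)
        PySem.Dict.empty).getD w [])
      = occList liberalKeyList w := by
  rw [dict_outer]
  simp [occList, pysem]

lemma enumerate_map_split {α β : Type} (f : α → β) (xs : List α) (s : Int) :
    PySem.List.enumerate (xs.map f) s = (PySem.List.enumerate xs s).map (fun p => (p.1, f p.2)) := by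
  induction xs generalizing s with
  | nil => simp [PySem.List.enumerate_nil]
  | cons a xs ih => simp [PySem.List.enumerate_cons, ih]

lemma split_fold (xs : List String) :
    (PySem.List.pyRange 0 (xs.length : Int) 1).foldl
      (fun acc i => acc ++ [PySem.Str.split₀ (PySem.List.pyGetD xs i "")]) []
      = xs.map PySem.Str.split₀ := by
  rw [PySem.List.foldl_pyRange_zero_pyGetD' xs "" (fun acc x => acc ++ [PySem.Str.split₀ x]) []]
  rw [PySem.List.foldl_append_singleton_eq_map]
  simp

-- B reduced to a flatMap normal form
lemma B_eq (C L : List String) :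
    matchSearches_alt C L
      = (PySem.List.enumerate C 0).flatMap (fun p =>
          (PySem.Str.split₀ p.2).flatMap (fun w => (occList L w).map (fun l => [p.1, l]))) := by
  simp only [matchSearches_alt, occ_eq]
  simp only [PySem.List.foldl_append_eq_flatMap]
  simp

-- index-loop over xs[i] as a loop over enumerate(xs)
lemma foldl_idx_enum {α β : Type} (xs : List α) (dflt : α) (F : β → Int → α → β) (init : β) :
    (PySem.List.pyRange 0 (xs.length : Int) 1).foldl (fun acc i => F acc i (PySem.List.pyGetD xs i dflt)) init
      = (PySem.List.enumerate xs 0).foldl (fun acc p => F acc p.1 p.2) init := by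
  rw [PySem.List.enumerate_eq_map_pyRange xs dflt, List.foldl_map]
  simp

lemma lvl4 (w : String) (c l : Int) (ws : List String) (acc : List (List Int)) :
    (PySem.List.pyRange 0 (ws.length : Int) 1).foldl
      (fun acc lWord => if w == PySem.List.pyGetD ws lWord "" then acc ++ [[c, l]] else acc) acc
      = acc ++ (ws.filter (fun w' => w == w')).map (fun _ => [c, l]) := by
  rw [PySem.List.foldl_pyRange_zero_pyGetD' ws ""
      (fun acc w' => if w == w' then acc ++ [[c, l]] else acc) acc]
  rw [PySem.List.foldl_append_if]

lemma lvl3 (w : String) (c : Int) (kL : List (List String)) (acc : List (List Int)) :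
    (PySem.List.pyRange 0 (kL.length : Int) 1).foldl (fun acc lHead =>
        (PySem.List.pyRange 0 ((PySem.List.pyGetD kL lHead []).length : Int) 1).foldl
          (fun acc lWord =>
            if w == PySem.List.pyGetD (PySem.List.pyGetD kL lHead []) lWord "" then acc ++ [[c, lHead]] else acc)
          acc) acc
      = acc ++ (PySem.List.enumerate kL 0).flatMap
          (fun q => (q.2.filter (fun w' => w == w')).map (fun _ => [c, q.1])) := by
  rw [foldl_idx_enum kL [] (fun acc lHead ws =>
        (PySem.List.pyRange 0 (ws.length : Int) 1).foldl
          (fun acc lWord => if w == PySem.List.pyGetD ws lWord "" then acc ++ [[c, lHead]] else acc) acc) acc]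
  rw [PySem.List.foldl_congr_mem _ _
      (fun acc q => acc ++ (q.2.filter (fun w' => w == w')).map (fun _ => [c, q.1])) acc
      (fun acc q _ => lvl4 w c q.1 q.2 acc)]
  rw [PySem.List.foldl_append_eq_flatMap]

lemma lvl2 (c : Int) (wsC : List String) (kL : List (List String)) (acc : List (List Int)) :
    (PySem.List.pyRange 0 (wsC.length : Int) 1).foldl (fun acc cWord =>
        (PySem.List.pyRange 0 (kL.length : Int) 1).foldl (fun acc lHead =>
          (PySem.List.pyRange 0 ((PySem.List.pyGetD kL lHead []).length : Int) 1).foldl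
            (fun acc lWord =>
              if PySem.List.pyGetD wsC cWord "" == PySem.List.pyGetD (PySem.List.pyGetD kL lHead []) lWord ""
              then acc ++ [[c, lHead]] else acc)
            acc) acc) acc
      = acc ++ wsC.flatMap (fun w => (PySem.List.enumerate kL 0).flatMap
          (fun q => (q.2.filter (fun w' => w == w')).map (fun _ => [c, q.1]))) := by
  rw [PySem.List.foldl_pyRange_zero_pyGetD' wsC "" (fun acc w =>
        (PySem.List.pyRange 0 (kL.length : Int) 1).foldl (fun acc lHead =>
          (PySem.List.pyRange 0 ((PySem.List.pyGetD kL lHead []).length : Int) 1).foldl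
            (fun acc lWord =>
              if w == PySem.List.pyGetD (PySem.List.pyGetD kL lHead []) lWord ""
              then acc ++ [[c, lHead]] else acc)
            acc) acc) acc]
  rw [PySem.List.foldl_congr_mem _ _
      (fun acc w => acc ++ (PySem.List.enumerate kL 0).flatMap
        (fun q => (q.2.filter (fun w' => w == w')).map (fun _ => [c, q.1]))) acc
      (fun acc w _ => lvl3 w c kL acc)]
  rw [PySem.List.foldl_append_eq_flatMap]

lemma lvl1 (kC kL : List (List String)) :
    (PySem.List.pyRange 0 (kC.length : Int) 1).foldl (fun acc cHead =>
      (PySem.List.pyRange 0 ((PySem.List.pyGetD kC cHead []).length : Int) 1).foldl (fun acc cWord =>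
        (PySem.List.pyRange 0 (kL.length : Int) 1).foldl (fun acc lHead =>
          (PySem.List.pyRange 0 ((PySem.List.pyGetD kL lHead []).length : Int) 1).foldl
            (fun acc lWord =>
              if PySem.List.pyGetD (PySem.List.pyGetD kC cHead []) cWord "" ==
                 PySem.List.pyGetD (PySem.List.pyGetD kL lHead []) lWord ""
              then acc ++ [[cHead, lHead]] else acc)
            acc) acc) acc) []
      = (PySem.List.enumerate kC 0).flatMap (fun p => p.2.flatMap (fun w =>
          (PySem.List.enumerate kL 0).flatMap
            (fun q => (q.2.filter (fun w' => w == w')).map (fun _ => [p.1, q.1])))) := by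
  rw [foldl_idx_enum kC [] (fun acc c wsC =>
      (PySem.List.pyRange 0 (wsC.length : Int) 1).foldl (fun acc cWord =>
        (PySem.List.pyRange 0 (kL.length : Int) 1).foldl (fun acc lHead =>
          (PySem.List.pyRange 0 ((PySem.List.pyGetD kL lHead []).length : Int) 1).foldl
            (fun acc lWord =>
              if PySem.List.pyGetD wsC cWord "" == PySem.List.pyGetD (PySem.List.pyGetD kL lHead []) lWord ""
              then acc ++ [[c, lHead]] else acc)
            acc) acc) acc) []]
  rw [PySem.List.foldl_congr_mem _ _
      (fun acc p => acc ++ p.2.flatMap (fun w => (PySem.List.enumerate kL 0).flatMap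
        (fun q => (q.2.filter (fun w' => w == w')).map (fun _ => [p.1, q.1])))) []
      (fun acc p _ => lvl2 p.1 p.2 kL acc)]
  rw [PySem.List.foldl_append_eq_flatMap, List.nil_append]

-- A reduced to the same normal form
lemma A_eq (C L : List String) :
    matchSearches C L
      = (PySem.List.enumerate C 0).flatMap (fun p =>
          (PySem.Str.split₀ p.2).flatMap (fun w => (occList L w).map (fun l => [p.1, l]))) := by
  simp only [matchSearches, split_fold]
  rw [lvl1 (C.map PySem.Str.split₀) (L.map PySem.Str.split₀)]
  simp only [occList, enumerate_map_split, List.flatMap_map, List.map_flatMap, List.map_map]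
  simp only [Function.comp_def]

-- ===== VERDICT (by name: the statement is the Claim_ definition above) =====
theorem matchSearches_spec : Claim_equal_matchSearches := by
  intro C L _
  unfold Spec_matchSearches
  rw [A_eq, B_eq]
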